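-- pv_equiv track=rewrite | github.com/pepsakdoek/py_anagram | tools.py | createsublist
-- ===== SOURCE A (Python) =====
-- def contains(needle,haystack):
--     tempstack = sorted(haystack)
--     tempn = sorted(needle)
--
--     for x in tempn:
--         if not (x in tempstack):
--             return False
--         else:
--             i = tempstack.index(x)
--             tempstack = sorted(tempstack[:i]+tempstack[i+1:])
--
--     return True
--
-- def createsublist(wordlist,filtertext, size = 0):
--     filtertext = filtertext.upper()
--     sublist = []
--
--     for word in wordlist:
--         if contains(word,filtertext):
--             if (size > 0) and (len(word) == size):
--                 sublist.append(word)
--             elif size == 0: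
--                 sublist.append(word)
--
--     return sublist
-- ===== SOURCE B (Python) =====
-- def createsublist(wordlist, filtertext, size=0):
--     ft = list(filtertext.upper())
--
--     def fits(w):
--         cw = list(w)
--         return all(cw.count(c) <= ft.count(c) for c in cw)
--
--     return [w for w in wordlist if fits(w) and (size == 0 or len(w) == size)]
-- ===== Notes on version B (the rewrite author's own statement) =====
-- stated objective: faster
-- what changed: The per-word containment test no longer sorts the filtertext and repeatedly index-erases-and-resorts it for every character of the word; B compares character multiplicities directly (word.count(c) <= filtertext.count(c) for each character), and the outer append loop becomes a list comprehension.
import Mathlib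
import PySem

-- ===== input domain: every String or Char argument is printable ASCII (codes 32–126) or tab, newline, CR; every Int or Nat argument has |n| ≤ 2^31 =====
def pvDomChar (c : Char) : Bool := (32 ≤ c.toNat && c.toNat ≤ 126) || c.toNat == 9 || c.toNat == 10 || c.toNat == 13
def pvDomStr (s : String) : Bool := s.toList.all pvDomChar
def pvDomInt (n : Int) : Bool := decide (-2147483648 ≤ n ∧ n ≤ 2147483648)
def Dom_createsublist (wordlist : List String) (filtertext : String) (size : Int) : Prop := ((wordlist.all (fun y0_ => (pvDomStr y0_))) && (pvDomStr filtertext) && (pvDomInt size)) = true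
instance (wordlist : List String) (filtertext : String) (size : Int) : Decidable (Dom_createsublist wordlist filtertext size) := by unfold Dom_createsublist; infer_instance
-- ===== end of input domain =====

-- B replaces A's per-character index-erase-and-resort containment loop by a direct count comparison
-- (each needed character's multiplicity in the word vs in the uppercased filtertext) and the
-- append-loop by a list comprehension; objective: faster (no repeated sorting per word).

-- ===== PORT A =====
-- the 'for x in tempn' loop of contains: state = tempstack
def pvLoopA : List Char → List Char → Bool
  | [], _ => true
  | x :: rest, tempstack =>
    if x ∈ tempstack then
      match PySem.List.index? tempstack x with
      | some i =>
          pvLoopA rest (PySem.List.sorted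
            (PySem.List.slice tempstack none (some (i : Int)) ++
             PySem.List.slice tempstack (some ((i : Int) + 1)) none) (fun c => c) false)
      | none => false   -- unreachable: guarded by the membership test (Python .index would raise)
    else false

def pvContainsA (needle haystack : String) : Bool :=
  pvLoopA (PySem.List.sorted needle.toList (fun c => c) false)
          (PySem.List.sorted haystack.toList (fun c => c) false)

def createsublist (wordlist : List String) (filtertext : String) (size : Int) : List String :=
  let ft := PySem.Str.upper filtertext
  wordlist.foldl (fun sublist word =>
    if pvContainsA word ft then
      if size > 0 ∧ PySem.Str.len word = size then sublist ++ [word]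
      else if size = 0 then sublist ++ [word]
      else sublist
    else sublist) []

-- ===== PORT B =====
def pvFitsB (ft : List Char) (w : String) : Bool :=
  let cw := w.toList
  cw.all (fun c => decide (PySem.List.count cw c ≤ PySem.List.count ft c))

def createsublist_alt (wordlist : List String) (filtertext : String) (size : Int) : List String :=
  let ft := (PySem.Str.upper filtertext).toList
  wordlist.filter (fun w => pvFitsB ft w && (size == 0 || PySem.Str.len w == size))

-- ===== PRECONDITION & SPEC =====
def Spec_createsublist (wordlist : List String) (filtertext : String) (size : Int) (out : List String) : Prop := out = createsublist_alt wordlist filtertext size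
instance (wordlist : List String) (filtertext : String) (size : Int) (out : List String) : Decidable (Spec_createsublist wordlist filtertext size out) := by unfold Spec_createsublist; infer_instance

-- ===== CLAIM (what is proved, stated in full; the proofs are below) =====
def Claim_equal_createsublist : Prop := ∀ (wordlist : List String) (filtertext : String) (size : Int), Dom_createsublist wordlist filtertext size → Spec_createsublist wordlist filtertext size (createsublist wordlist filtertext size)

-- ===== LEMMAS AND PROOFS =====

-- A's removal loop succeeds iff every character occurs at least as often in the stack
lemma pvLoopA_iff (n : List Char) : ∀ ts : List Char,
    (pvLoopA n ts = true ↔ ∀ c, n.count c ≤ ts.count c) := by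
  induction n with
  | nil => intro ts; simp [pvLoopA]
  | cons x rest ih =>
    intro ts
    by_cases hx : x ∈ ts
    · obtain ⟨i, hi⟩ := Option.isSome_iff_exists.mp (List.isSome_idxOf?.mpr hx)
      have hslice : PySem.List.slice ts none (some (i : Int)) ++
          PySem.List.slice ts (some ((i : Int) + 1)) none = ts.eraseIdx i := by
        have h1 : PySem.List.slice ts none (some (i : Int)) = ts.take i :=
          PySem.List.slice_to_natCast ts i
        have h2 : PySem.List.slice ts (some ((i : Int) + 1)) none = ts.drop (i + 1) := by
          have : ((i : Int) + 1) = ((i + 1 : Nat) : Int) := by push_cast; ring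
          rw [this, PySem.List.slice_from_natCast]
        rw [h1, h2, List.eraseIdx_eq_take_drop_succ]
      have herase : ts.eraseIdx i = ts.erase x := by
        rw [List.erase_eq_eraseIdx, hi]
      rw [show pvLoopA (x :: rest) ts =
          pvLoopA rest (PySem.List.sorted
            (PySem.List.slice ts none (some (i : Int)) ++
             PySem.List.slice ts (some ((i : Int) + 1)) none) (fun c => c) false) by
        simp [pvLoopA, hx, PySem.List.index?_eq_idxOf?, hi]]
      rw [hslice, herase, ih]
      have hcnt : ∀ c, (PySem.List.sorted (ts.erase x) (fun c => c) false).count c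
          = (ts.erase x).count c :=
        fun c => (PySem.List.sorted_perm (ts.erase x) (fun c => c) false).count_eq c
      have hpos : 1 ≤ ts.count x := List.count_pos_iff.mpr hx
      constructor
      · intro h c
        have hc := h c
        rw [hcnt, List.count_erase] at hc
        rw [List.count_cons]
        by_cases hcx : x = c
        · subst hcx; simp at hc ⊢; omega
        · simp [hcx] at hc ⊢; omega
      · intro h c
        have hc := h c
        rw [List.count_cons] at hc
        rw [hcnt, List.count_erase]
        by_cases hcx : x = c
        · subst hcx; simp at hc ⊢; omega
        · simp [hcx] at hc ⊢; omega
    · simp only [pvLoopA, hx, ite_false]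
      constructor
      · intro h; cases h
      · intro h
        have := h x
        simp [List.count_eq_zero.mpr hx, List.count_cons_self] at this
  
-- B's fit test says the same thing, quantified over all characters
lemma pvFitsB_iff (ft : List Char) (w : String) :
    (pvFitsB ft w = true ↔ ∀ c, w.toList.count c ≤ ft.count c) := by
  simp only [pvFitsB, List.all_eq_true, decide_eq_true_eq, PySem.List.count_eq]
  constructor
  · intro h c
    by_cases hc : c ∈ w.toList
    · exact h c hc
    · simp [List.count_eq_zero.mpr hc]
  · intro h c _; exact h c

lemma contains_eq_fits (w ftS : String) : pvContainsA w ftS = pvFitsB ftS.toList w := by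
  rw [Bool.eq_iff_iff, pvFitsB_iff]
  unfold pvContainsA
  rw [pvLoopA_iff]
  constructor <;> intro h c <;> have hc := h c <;>
    rwa [(PySem.List.sorted_perm w.toList (fun c => c) false).count_eq,
         (PySem.List.sorted_perm ftS.toList (fun c => c) false).count_eq] at *

-- the nested size guards collapse to B's single boolean condition
lemma guard_eq (size : Int) (w : String) (a b : List String) :
    (if size > 0 ∧ PySem.Str.len w = size then a
     else if size = 0 then a else b) =
    (if (size == 0 || PySem.Str.len w == size) then a else b) := by
  have hnn : (0 : Int) ≤ PySem.Str.len w := by rw [PySem.Str.len_eq]; positivity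
  generalize ht : PySem.Str.len w = t at *
  simp only [Bool.or_eq_true, beq_iff_eq]
  split_ifs <;> first | rfl | omega

-- ===== VERDICT (by name: the statement is the Claim_ definition above) =====
theorem createsublist_spec : Claim_equal_createsublist := by
  intro wordlist filtertext size _
  unfold Spec_createsublist createsublist createsublist_alt
  simp only []
  have hb : (fun (sublist : List String) (word : String) =>
      if pvContainsA word (PySem.Str.upper filtertext) then
        if size > 0 ∧ PySem.Str.len word = size then sublist ++ [word]
        else if size = 0 then sublist ++ [word]
        else sublist
      else sublist) =
      fun acc x => if (pvFitsB (PySem.Str.upper filtertext).toList x &&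
          (size == 0 || PySem.Str.len x == size)) then acc ++ [x] else acc := by
    funext acc w
    rw [contains_eq_fits]
    by_cases hf : pvFitsB (PySem.Str.upper filtertext).toList w
    · simp only [hf, if_true, Bool.true_and]
      exact guard_eq size w (acc ++ [w]) acc
    · have hf' : pvFitsB (PySem.Str.upper filtertext).toList w = false :=
        Bool.eq_false_iff.mpr hf
      rw [if_neg hf, hf', Bool.false_and]
      simp
  rw [hb, PySem.List.foldl_append_if_eq_filter, List.nil_append]
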